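-- pv_equiv track=rewrite | github.com/subhLLM/aiimsllm | scrapj.py | clean_extracted_entities
-- ===== SOURCE A (Python) =====
-- def clean_extracted_entities(entities):
--     """
--     Cleans broken or subword tokens from entity lists like doctors/persons/etc.
--     - Removes '##' prefixes (BERT-style subwords)
--     - Joins fragments into full names (e.g., 'Shr', '##uti', 'Sharma' → 'Shruti Sharma')
--     - Handles prefixes like 'Dr.' or 'Prof.'
--     - Deduplicates and trims
--     """
--     name_prefixes = {"dr", "dr.", "prof", "prof.", "mr", "ms", "mrs"}
--
--     cleaned_entities = {}
--     for key, values in entities.items():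
--         if not values or not isinstance(values, list):
--             cleaned_entities[key] = []
--             continue
--
--         tokens = [v.replace("##", "").strip() for v in values if isinstance(v, str) and len(v.strip()) > 0]
--         phrases = []
--         buffer = []
--
--         for token in tokens:
--             token_lower = token.lower()
--
--             if token_lower in name_prefixes:
--                 if buffer:
--                     phrases.append(" ".join(buffer))
--                 buffer = [token]
--             elif token[0].isupper() or token.istitle():
--                 buffer.append(token)
--             else:
--                 if buffer:
--                     buffer.append(token)
--                 else:
--                     buffer = [token]
--
--         if buffer:
--             phrases.append(" ".join(buffer))
--
--         cleaned = sorted(set([p.strip() for p in phrases if p.strip()]))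
--         cleaned_entities[key] = cleaned
--
--     return cleaned_entities
-- ===== SOURCE B (Python) =====
-- def clean_extracted_entities(entities):
--     """Same result as A: split the cleaned token list into segments recursively
--     (a new segment starts at every name-prefix token), then join/dedupe/sort."""
--     name_prefixes = {"dr", "dr.", "prof", "prof.", "mr", "ms", "mrs"}
--
--     def _segments(tokens):
--         if not tokens:
--             return []
--         i = 1
--         while i < len(tokens) and tokens[i].lower() not in name_prefixes:
--             i += 1
--         return [tokens[:i]] + _segments(tokens[i:])
--
--     def _clean(values):
--         if not values or not isinstance(values, list):
--             return []
--         tokens = [v.replace("##", "").strip() for v in values if isinstance(v, str) and len(v.strip()) > 0]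
--         phrases = [" ".join(seg) for seg in _segments(tokens)]
--         return sorted(set(p.strip() for p in phrases if p.strip()))
--
--     return {key: _clean(values) for key, values in entities.items()}
-- ===== Notes on version B (the rewrite author's own statement) =====
-- stated objective: simpler
-- what changed: Replaces A's stateful buffer/flush loop (with its redundant isupper/istitle/else branches, which all just append) by a recursive split of the cleaned token list into segments starting at each name-prefix token, then joins each segment; dedup/sort unchanged.
-- outside the precondition, e.g. on clean_extracted_entities({'doctors': ['##']}): A raises IndexError, B returns {'doctors': []}
import Mathlib
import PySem

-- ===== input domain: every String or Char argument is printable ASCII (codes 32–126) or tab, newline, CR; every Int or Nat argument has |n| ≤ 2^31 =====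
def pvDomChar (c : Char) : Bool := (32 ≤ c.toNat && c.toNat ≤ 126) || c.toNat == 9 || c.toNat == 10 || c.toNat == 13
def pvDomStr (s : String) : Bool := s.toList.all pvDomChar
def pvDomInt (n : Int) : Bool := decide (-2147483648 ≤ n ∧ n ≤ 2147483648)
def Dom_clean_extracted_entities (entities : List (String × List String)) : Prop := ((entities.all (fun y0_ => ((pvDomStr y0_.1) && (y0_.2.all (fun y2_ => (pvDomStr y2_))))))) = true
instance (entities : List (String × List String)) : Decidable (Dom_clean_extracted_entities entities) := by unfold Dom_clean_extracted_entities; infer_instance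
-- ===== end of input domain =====

-- B replaces A's stateful buffer/flush loop (with its redundant isupper/istitle branches) by a
-- recursive split of the cleaned token list into prefix-started segments, then joins each segment;
-- objective: simpler. Equivalence is about the returned value (neither program mutates its argument).

-- ===== PORT A =====
def pvPrefixesA : PySem.Set String :=
  PySem.Set.ofList ["dr", "dr.", "prof", "prof.", "mr", "ms", "mrs"]

-- hand port of str.istitle (PySem has no istitle); exact on the ASCII domain, where a
-- character is titlecased/uppercased iff isupper and cased iff isupper or islower
def pvIstitleAux : List Char → Bool → Bool → Bool
  | [], _, cased => cased
  | c :: cs, prev, cased =>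
    if PySem.Chars.isupper c then (if prev then false else pvIstitleAux cs true true)
    else if PySem.Chars.islower c then (if !prev then false else pvIstitleAux cs true true)
    else pvIstitleAux cs false cased

def pvIstitle (s : String) : Bool := pvIstitleAux s.toList false false

-- one iteration of A's 'for token in tokens' loop; state = (phrases, buffer)
def pvStepA (st : List String × List String) (token : String) : List String × List String :=
  if pvPrefixesA.contains (PySem.Str.lower token) then
    ((if st.2 ≠ [] then st.1 ++ [PySem.Str.join " " st.2] else st.1), [token])
  else if (match PySem.Str.pyGet? token 0 with
           | some c => PySem.Chars.isupper c
           | none => false) || pvIstitle token then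
    -- token[0] raises IndexError when token = "": excluded by Pre_ (the 'none' arm is unreachable there)
    (st.1, st.2 ++ [token])
  else
    (st.1, if st.2 ≠ [] then st.2 ++ [token] else [token])

def pvCleanValuesA (values : List String) : List String :=
  if values = [] then []
  else
    let tokens := (values.filter (fun v => PySem.Str.len (PySem.Str.strip v) > 0)).map
      (fun v => PySem.Str.strip (PySem.Str.replace v "##" ""))
    let st := tokens.foldl pvStepA ([], [])
    let phrases := if st.2 ≠ [] then st.1 ++ [PySem.Str.join " " st.2] else st.1
    PySem.List.sorted
      (PySem.Set.ofList ((phrases.filter (fun p => PySem.Str.strip p ≠ "")).map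
        (fun p => PySem.Str.strip p)))
      (fun x => x) false

def clean_extracted_entities (entities : List (String × List String)) : List (String × List String) :=
  -- entities is a Python dict: normalise the association list as dict(...) does, then
  -- build cleaned_entities by inserting key by key as A's loop does
  ((PySem.Dict.ofList entities).items.foldl
    (fun acc kv => acc.insert kv.1 (pvCleanValuesA kv.2))
    PySem.Dict.empty).items

-- ===== PORT B =====
def pvPrefixesB : PySem.Set String :=
  PySem.Set.ofList ["dr", "dr.", "prof", "prof.", "mr", "ms", "mrs"]

-- Source B's _segments: the while scan up to the next name-prefix token is tokens[:i] / tokens[i:],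
-- i.e. takeWhile / dropWhile on the tail
def pvSegments : List String → List (List String)
  | [] => []
  | t :: ts =>
    (t :: ts.takeWhile (fun s => !pvPrefixesB.contains (PySem.Str.lower s))) ::
      pvSegments (ts.dropWhile (fun s => !pvPrefixesB.contains (PySem.Str.lower s)))
termination_by ts => ts.length
decreasing_by
  simpa using Nat.lt_succ_of_le (List.length_dropWhile_le _ _)

def pvCleanValuesB (values : List String) : List String :=
  if values = [] then []
  else
    let tokens := (values.filter (fun v => PySem.Str.len (PySem.Str.strip v) > 0)).map
      (fun v => PySem.Str.strip (PySem.Str.replace v "##" ""))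
    let phrases := (pvSegments tokens).map (fun seg => PySem.Str.join " " seg)
    PySem.List.sorted
      (PySem.Set.ofList ((phrases.filter (fun p => PySem.Str.strip p ≠ "")).map
        (fun p => PySem.Str.strip p)))
      (fun x => x) false

def clean_extracted_entities_alt (entities : List (String × List String)) : List (String × List String) :=
  (PySem.Dict.ofList entities).items.map (fun kv => (kv.1, pvCleanValuesB kv.2))

-- ===== PRECONDITION & SPEC =====
-- Pre_ excludes inputs on which A raises IndexError (token[0] on an empty string): some value
-- whose strip is non-empty cleans to the empty string after removing '##' and stripping.
def Pre_clean_extracted_entities (entities : List (String × List String)) : Prop :=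
  ∀ kv ∈ (PySem.Dict.ofList entities).items, ∀ v ∈ kv.2,
    PySem.Str.len (PySem.Str.strip v) > 0 →
      PySem.Str.strip (PySem.Str.replace v "##" "") ≠ ""

instance (entities : List (String × List String)) : Decidable (Pre_clean_extracted_entities entities) := by
  unfold Pre_clean_extracted_entities; infer_instance

def pvWitness_clean_extracted_entities : (List (String × List String)) :=
  [("doctors", ["Dr", "Shr", "##uti", "Sharma", "prof", "Mehta"]), ("rooms", [])]

def Spec_clean_extracted_entities (entities : List (String × List String)) (out : List (String × List String)) : Prop := out = clean_extracted_entities_alt entities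
instance (entities : List (String × List String)) (out : List (String × List String)) : Decidable (Spec_clean_extracted_entities entities out) := by unfold Spec_clean_extracted_entities; infer_instance

-- ===== CLAIM (what is proved, stated in full; the proofs are below) =====
def Claim_equal_clean_extracted_entities : Prop := ∀ (entities : List (String × List String)), Dom_clean_extracted_entities entities → Pre_clean_extracted_entities entities → Spec_clean_extracted_entities entities (clean_extracted_entities entities)

-- ===== LEMMAS AND PROOFS =====

-- A's open-buffer segments: current non-empty buffer plus the remaining tokens
def pvSegWith (buf : List String) : List String → List (List String)
  | [] => [buf]
  | t :: ts =>
    if pvPrefixesA.contains (PySem.Str.lower t) then buf :: pvSegWith [t] ts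
    else pvSegWith (buf ++ [t]) ts

theorem pvSegWith_eq (ts : List String) :
    ∀ buf, pvSegWith buf ts =
      (buf ++ ts.takeWhile (fun s => !pvPrefixesA.contains (PySem.Str.lower s))) ::
        pvSegments (ts.dropWhile (fun s => !pvPrefixesA.contains (PySem.Str.lower s))) := by
  induction ts with
  | nil => intro buf; simp [pvSegWith, pvSegments]
  | cons t ts ih =>
    intro buf
    by_cases h : pvPrefixesA.contains (PySem.Str.lower t) = true
    · rw [pvSegWith, if_pos h]
      simp only [List.takeWhile, List.dropWhile, h, Bool.not_true]
      rw [ih [t], pvSegments]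
      simp only [pvPrefixesB, pvPrefixesA]
      simp
    · rw [pvSegWith, if_neg h]
      have h' : pvPrefixesA.contains (PySem.Str.lower t) = false := by
        simpa using h
      simp only [List.takeWhile, List.dropWhile, h', Bool.not_false]
      rw [ih (buf ++ [t])]
      simp

-- finalize A's loop state into its phrase list
def pvFinA (st : List String × List String) : List String :=
  if st.2 ≠ [] then st.1 ++ [PySem.Str.join " " st.2] else st.1

theorem pvFoldA_eq (ts : List String) :
    ∀ ph buf, buf ≠ [] →
      pvFinA (ts.foldl pvStepA (ph, buf)) =
        ph ++ (pvSegWith buf ts).map (fun seg => PySem.Str.join " " seg) := by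
  induction ts with
  | nil => intro ph buf hb; simp [pvFinA, pvSegWith, hb]
  | cons t ts ih =>
    intro ph buf hb
    by_cases h : pvPrefixesA.contains (PySem.Str.lower t) = true
    · have hm : PySem.Str.lower t ∈ pvPrefixesA := by simpa using h
      have hstep : pvStepA (ph, buf) t = (ph ++ [PySem.Str.join " " buf], [t]) := by
        simp [pvStepA, hm, hb]
      rw [List.foldl_cons, hstep, ih _ [t] (by simp), pvSegWith, if_pos h]
      simp
    · have hstep : pvStepA (ph, buf) t = (ph, buf ++ [t]) := by
        unfold pvStepA
        rw [if_neg h]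
        split <;> simp [hb]
      rw [List.foldl_cons, hstep, ih _ (buf ++ [t]) (by simp), pvSegWith, if_neg h]

theorem pvPhrasesA_eq (ts : List String) :
    pvFinA (ts.foldl pvStepA ([], [])) =
      (pvSegments ts).map (fun seg => PySem.Str.join " " seg) := by
  cases ts with
  | nil => simp [pvFinA, pvSegments]
  | cons t ts =>
    have hstep : pvStepA ([], []) t = ([], [t]) := by
      unfold pvStepA
      split
      · simp
      · split <;> simp
    rw [List.foldl_cons, hstep, pvFoldA_eq ts [] [t] (by simp), pvSegWith_eq, pvSegments]
    simp [pvPrefixesA, pvPrefixesB]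

theorem pvCleanValues_eq (values : List String) :
    pvCleanValuesA values = pvCleanValuesB values := by
  unfold pvCleanValuesA pvCleanValuesB
  split
  · rfl
  · simp only [← pvPhrasesA_eq, pvFinA]

-- ===== VERDICT (by name: the statement is the Claim_ definition above) =====
theorem clean_extracted_entities_spec : Claim_equal_clean_extracted_entities := by
  intro entities _ _
  unfold Spec_clean_extracted_entities clean_extracted_entities clean_extracted_entities_alt
  rw [PySem.Dict.items_foldl_insert_fresh]
  · simp [pvCleanValues_eq, PySem.Dict.empty]
  · intro a _; simp [PySem.Dict.contains_empty]
  · have := PySem.Dict.nodup_keys_ofList (ps := entities)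
    simpa [PySem.Dict.keys] using this
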